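-- pv_equiv track=rewrite | github.com/parasiitism/AlgoDaily | leetcode/2420/main.py | goodIndices
-- ===== SOURCE A (Python) =====
-- from typing import List
--
-- def goodIndices(nums: List[int], k: int) -> List[int]:
--     n = len(nums)
--     non_inc = n * [1]
--     non_dec = n * [1]
--     for i in range(1, n):
--         if nums[i] <= nums[i-1]:
--             non_inc[i] = non_inc[i-1] + 1
--     for i in range(n-2, -1, -1):
--         if nums[i] <= nums[i+1]:
--             non_dec[i] = non_dec[i+1] + 1
--     res = []
--     for i in range(k, n - k):
--         if non_inc[i-1] >= k and non_dec[i+1] >= k: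
--             res.append(i)
--     return res
-- ===== SOURCE B (Python) =====
-- from typing import List
--
-- def goodIndices(nums: List[int], k: int) -> List[int]:
--     n = len(nums)
--     # prefix counts of monotonicity breaks: up[j] = #ascents (nums[t-1] < nums[t]) with t <= j,
--     # down[j] = #descents (nums[t] < nums[t-1]) with t <= j
--     up = [0]
--     down = [0]
--     for j in range(1, n):
--         up.append(up[j - 1] + (1 if nums[j] > nums[j - 1] else 0))
--         down.append(down[j - 1] + (1 if nums[j] < nums[j - 1] else 0))
--     return [i for i in range(k, n - k)
--             if up[i - 1] == up[i - k] and down[i + k] == down[i + 1]]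
-- ===== Notes on version B (the rewrite author's own statement) =====
-- stated objective: alternative
-- what changed: B replaces A's run-length DP arrays (non_inc/non_dec) by prefix counts of monotonicity breaks (ascents/descents): an index is good iff the count of ascents over the k-window left of i and the count of descents over the k-window right of i are both zero, checked by two prefix-sum subtractions.
-- outside the precondition, e.g. on goodIndices([], 0): A returns [], B returns []
import Mathlib
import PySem

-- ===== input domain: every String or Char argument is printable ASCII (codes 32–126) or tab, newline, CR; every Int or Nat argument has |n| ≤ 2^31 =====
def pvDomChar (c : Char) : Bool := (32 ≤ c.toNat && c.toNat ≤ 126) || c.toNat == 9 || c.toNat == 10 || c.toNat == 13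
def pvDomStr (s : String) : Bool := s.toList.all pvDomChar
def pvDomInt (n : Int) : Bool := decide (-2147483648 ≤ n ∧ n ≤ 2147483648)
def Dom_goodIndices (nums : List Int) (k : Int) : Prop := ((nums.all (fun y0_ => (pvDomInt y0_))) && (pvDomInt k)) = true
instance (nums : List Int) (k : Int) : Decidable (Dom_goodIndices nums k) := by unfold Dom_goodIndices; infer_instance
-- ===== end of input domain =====

-- ===== PORT A =====
-- One honest line: B replaces A's run-length DP arrays by prefix counts of ascents/descents,
-- deciding each index by two prefix-sum window subtractions (objective: alternative, same O(n)).
def goodIndices (nums : List Int) (k : Int) : List Int :=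
  let n : Int := PySem.List.len nums
  let nonInc : List Int := List.replicate nums.length (1 : Int)
  let nonDec : List Int := List.replicate nums.length (1 : Int)
  let nonInc := (PySem.List.pyRange 1 n 1).foldl (fun arr i =>
      if PySem.List.pyGetD nums i 0 ≤ PySem.List.pyGetD nums (i - 1) 0 then
        PySem.List.pySetD arr i (PySem.List.pyGetD arr (i - 1) 0 + 1)
      else arr) nonInc
  let nonDec := (PySem.List.pyRange (n - 2) (-1) (-1)).foldl (fun arr i =>
      if PySem.List.pyGetD nums i 0 ≤ PySem.List.pyGetD nums (i + 1) 0 then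
        PySem.List.pySetD arr i (PySem.List.pyGetD arr (i + 1) 0 + 1)
      else arr) nonDec
  (PySem.List.pyRange k (n - k) 1).foldl (fun res i =>
      if k ≤ PySem.List.pyGetD nonInc (i - 1) 0 ∧ k ≤ PySem.List.pyGetD nonDec (i + 1) 0 then
        res ++ [i]
      else res) []

-- ===== PORT B =====
def goodIndices_alt (nums : List Int) (k : Int) : List Int :=
  let n : Int := PySem.List.len nums
  let st := (PySem.List.pyRange 1 n 1).foldl (fun (st : List Int × List Int) j =>
      (st.1 ++ [PySem.List.pyGetD st.1 (j - 1) 0 +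
          (if PySem.List.pyGetD nums j 0 > PySem.List.pyGetD nums (j - 1) 0 then (1 : Int) else 0)],
       st.2 ++ [PySem.List.pyGetD st.2 (j - 1) 0 +
          (if PySem.List.pyGetD nums j 0 < PySem.List.pyGetD nums (j - 1) 0 then (1 : Int) else 0)]))
      ([0], [0])
  (PySem.List.pyRange k (n - k) 1).filter (fun i =>
      decide (PySem.List.pyGetD st.1 (i - 1) 0 = PySem.List.pyGetD st.1 (i - k) 0 ∧
              PySem.List.pyGetD st.2 (i + k) 0 = PySem.List.pyGetD st.2 (i + 1) 0))

-- ===== PRECONDITION & SPEC =====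
-- Pre_ excludes k ≤ 0, where A raises IndexError (the non_dec[i+1] read runs past the end, or
-- negative-index reads hit an empty array) on every input except ([], 0), on which A returns []
-- and B returns [] as well.
def Pre_goodIndices (nums : List Int) (k : Int) : Prop := 1 ≤ k
instance (nums : List Int) (k : Int) : Decidable (Pre_goodIndices nums k) := by
  unfold Pre_goodIndices; infer_instance
def pvWitness_goodIndices : List Int × Int := ([2, 1, 1, 1, 3, 4, 1], 2)

def Spec_goodIndices (nums : List Int) (k : Int) (out : List Int) : Prop := out = goodIndices_alt nums k
instance (nums : List Int) (k : Int) (out : List Int) : Decidable (Spec_goodIndices nums k out) := by unfold Spec_goodIndices; infer_instance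

-- ===== CLAIM (what is proved, stated in full; the proofs are below) =====
def Claim_equal_goodIndices : Prop := ∀ (nums : List Int) (k : Int), Dom_goodIndices nums k → Pre_goodIndices nums k → Spec_goodIndices nums k (goodIndices nums k)

-- ===== LEMMAS AND PROOFS =====

-- run length of the non-increasing run ending at j (A's non_inc[j])
def niRec (nums : List Int) : Nat → Int
  | 0 => 1
  | j + 1 => if nums.getD (j + 1) 0 ≤ nums.getD j 0 then niRec nums j + 1 else 1

-- run length of the non-decreasing run starting at n-1-d (A's non_dec[n-1-d])
def ndR (nums : List Int) (n : Nat) : Nat → Int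
  | 0 => 1
  | d + 1 => if nums.getD (n - 2 - d) 0 ≤ nums.getD (n - 1 - d) 0 then ndR nums n d + 1 else 1

-- B's prefix counts: number of ascents / descents at positions 1..j
def upRec (nums : List Int) : Nat → Int
  | 0 => 0
  | j + 1 => upRec nums j + (if nums.getD j 0 < nums.getD (j + 1) 0 then 1 else 0)

def downRec (nums : List Int) : Nat → Int
  | 0 => 0
  | j + 1 => downRec nums j + (if nums.getD (j + 1) 0 < nums.getD j 0 then 1 else 0)

theorem niPos (nums : List Int) (j : Nat) : 1 ≤ niRec nums j := by
  induction j with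
  | zero => simp [niRec]
  | succ j ih => simp only [niRec]; split_ifs <;> omega

theorem ndPos (nums : List Int) (n d : Nat) : 1 ≤ ndR nums n d := by
  induction d with
  | zero => simp [ndR]
  | succ d ih => simp only [ndR]; split_ifs <;> omega

theorem upMono (nums : List Int) (a b : Nat) (h : a ≤ b) : upRec nums a ≤ upRec nums b := by
  induction b with
  | zero => have : a = 0 := by omega
            subst this; exact le_refl _
  | succ b ih =>
      by_cases hab : a = b + 1
      · subst hab; exact le_refl _
      · have h1 := ih (by omega)
        simp only [upRec]; split_ifs <;> omega

theorem dnMono (nums : List Int) (a b : Nat) (h : a ≤ b) : downRec nums a ≤ downRec nums b := by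
  induction b with
  | zero => have : a = 0 := by omega
            subst this; exact le_refl _
  | succ b ih =>
      by_cases hab : a = b + 1
      · subst hab; exact le_refl _
      · have h1 := ih (by omega)
        simp only [downRec]; split_ifs <;> omega

-- the key counting equivalence on the left windows
theorem niUp (nums : List Int) : ∀ (j K : Nat), 1 ≤ K → K ≤ j + 1 →
    ((K : Int) ≤ niRec nums j ↔ upRec nums j = upRec nums (j + 1 - K)) := by
  intro j
  induction j with
  | zero =>
      intro K h1 h2
      have : K = 1 := by omega
      subst this; simp [niRec]
  | succ j ih =>
      intro K h1 h2
      by_cases hK1 : K = 1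
      · subst hK1
        simp only [Nat.cast_one, Nat.add_sub_cancel, iff_true]
        exact niPos nums (j + 1)
      · have hK2 : 2 ≤ K := by omega
        by_cases hc : nums.getD (j + 1) 0 ≤ nums.getD j 0
        · have hni : niRec nums (j + 1) = niRec nums j + 1 := by
            simp only [niRec]; rw [if_pos hc]
          have hup : upRec nums (j + 1) = upRec nums j := by
            simp only [upRec]; rw [if_neg (not_lt.mpr hc), add_zero]
          have hih := ih (K - 1) (by omega) (by omega)
          rw [show j + 1 - (K - 1) = j + 2 - K from by omega] at hih
          rw [hni, hup, show j + 1 + 1 - K = j + 2 - K from by omega]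
          omega
        · have hni : niRec nums (j + 1) = 1 := by
            simp only [niRec]; rw [if_neg hc]
          have hup : upRec nums (j + 1) = upRec nums j + 1 := by
            simp only [upRec]; rw [if_pos (not_le.mp hc)]
          have hm := upMono nums (j + 1 + 1 - K) j (by omega)
          rw [hni, hup]
          omega

-- the key counting equivalence on the right windows
theorem ndDown (nums : List Int) (n : Nat) : ∀ (d K : Nat), 1 ≤ K → K ≤ d + 1 → d + 2 ≤ n →
    ((K : Int) ≤ ndR nums n d ↔ downRec nums (n - 1 - d + (K - 1)) = downRec nums (n - 1 - d)) := by
  intro d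
  induction d with
  | zero =>
      intro K h1 h2 h3
      have : K = 1 := by omega
      subst this; simp [ndR]
  | succ d ih =>
      intro K h1 h2 h3
      have he1 : n - 1 - d = (n - 2 - d) + 1 := by omega
      by_cases hK1 : K = 1
      · subst hK1
        simp only [Nat.cast_one, Nat.sub_self, Nat.add_zero, iff_true]
        exact ndPos nums n (d + 1)
      · have hK2 : 2 ≤ K := by omega
        by_cases hc : nums.getD (n - 2 - d) 0 ≤ nums.getD (n - 1 - d) 0
        · have hnd : ndR nums n (d + 1) = ndR nums n d + 1 := by
            simp only [ndR]; rw [if_pos hc]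
          have hdn : downRec nums (n - 1 - d) = downRec nums (n - 2 - d) := by
            rw [he1]; simp only [downRec]
            rw [← he1, if_neg (not_lt.mpr hc), add_zero]
          have hih := ih (K - 1) (by omega) (by omega) (by omega)
          rw [show n - 1 - d + (K - 1 - 1) = n - 1 - (d + 1) + (K - 1) from by omega,
              hdn, show n - 2 - d = n - 1 - (d + 1) from by omega] at hih
          rw [hnd]
          omega
        · have hnd : ndR nums n (d + 1) = 1 := by
            simp only [ndR]; rw [if_neg hc]
          have hdn : downRec nums (n - 1 - d) = downRec nums (n - 2 - d) + 1 := by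
            rw [he1]; simp only [downRec]
            rw [← he1, if_pos (not_le.mp hc)]
          have hm := dnMono nums (n - 1 - d) (n - 1 - (d + 1) + (K - 1)) (by omega)
          rw [show n - 2 - d = n - 1 - (d + 1) from by omega] at hdn
          rw [hnd]
          omega

theorem niLen (nums : List Int) (l : List Int) (init : List Int) :
    (l.foldl (fun arr i =>
      if PySem.List.pyGetD nums i 0 ≤ PySem.List.pyGetD nums (i - 1) 0 then
        PySem.List.pySetD arr i (PySem.List.pyGetD arr (i - 1) 0 + 1)
      else arr) init).length = init.length := by
  induction l generalizing init with
  | nil => rfl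
  | cons x xs ih =>
      rw [List.foldl_cons, ih]
      split_ifs <;> simp [PySem.List.length_pySetD]

theorem ndLen (nums : List Int) (l : List Int) (init : List Int) :
    (l.foldl (fun arr i =>
      if PySem.List.pyGetD nums i 0 ≤ PySem.List.pyGetD nums (i + 1) 0 then
        PySem.List.pySetD arr i (PySem.List.pyGetD arr (i + 1) 0 + 1)
      else arr) init).length = init.length := by
  induction l generalizing init with
  | nil => rfl
  | cons x xs ih =>
      rw [List.foldl_cons, ih]
      split_ifs <;> simp [PySem.List.length_pySetD]

theorem niLoop (nums : List Int) (m : Nat) (h1 : 1 ≤ m) (hm : m ≤ nums.length) :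
    ∀ j < nums.length,
      PySem.List.pyGetD
        ((PySem.List.pyRange 1 (m : Int) 1).foldl (fun arr i =>
          if PySem.List.pyGetD nums i 0 ≤ PySem.List.pyGetD nums (i - 1) 0 then
            PySem.List.pySetD arr i (PySem.List.pyGetD arr (i - 1) 0 + 1)
          else arr) (List.replicate nums.length (1 : Int))) (j : Int) 0
      = if j < m then niRec nums j else 1 := by
  induction m with
  | zero => omega
  | succ m ih =>
      by_cases hm1 : m = 0
      · subst hm1
        intro j hj
        rw [PySem.List.pyRange_one_eq_nil (by norm_num)]
        simp only [List.foldl_nil, PySem.List.pyGetD_natCast]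
        rw [List.getD_replicate _ hj]
        by_cases h0 : j < 1
        · have : j = 0 := by omega
          subst this; simp [niRec]
        · rw [if_neg h0]
      · intro j hj
        have hmm : 1 ≤ m := by omega
        have hsplit : PySem.List.pyRange 1 ((m+1 : Nat) : Int) 1
            = PySem.List.pyRange 1 (m : Int) 1 ++ [(m : Int)] := by
          push_cast
          exact PySem.List.pyRange_one_succ_right (by exact_mod_cast hmm)
        rw [hsplit, List.foldl_append]
        set L := (PySem.List.pyRange 1 (m : Int) 1).foldl (fun arr i =>
          if PySem.List.pyGetD nums i 0 ≤ PySem.List.pyGetD nums (i - 1) 0 then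
            PySem.List.pySetD arr i (PySem.List.pyGetD arr (i - 1) 0 + 1)
          else arr) (List.replicate nums.length (1 : Int)) with hL
        have hLlen : L.length = nums.length := by rw [hL, niLen]; simp
        have hcast : ((m : Int) - 1) = ((m - 1 : Nat) : Int) := by omega
        simp only [List.foldl_cons, List.foldl_nil]
        have hgetm1 : PySem.List.pyGetD L ((m:Int) - 1) 0 = niRec nums (m - 1) := by
          rw [hcast, ih (by omega) (by omega) (m-1) (by omega), if_pos (by omega)]
        have hniRecm : niRec nums m
            = if nums.getD m 0 ≤ nums.getD (m-1) 0 then niRec nums (m-1) + 1 else 1 := by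
          conv_lhs => rw [show m = (m-1)+1 by omega]
          simp only [niRec]
          rw [show m - 1 + 1 = m by omega]
        by_cases hc : PySem.List.pyGetD nums (m:Int) 0 ≤ PySem.List.pyGetD nums ((m:Int) - 1) 0
        · rw [if_pos hc, hgetm1]
          rw [PySem.List.pyGetD_pySetD_natCast L m j _ 0 (by omega)]
          by_cases hjm : j = m
          · subst hjm
            rw [if_pos rfl, if_pos (by omega), hniRecm, if_pos ?_]
            · rw [PySem.List.pyGetD_natCast, hcast, PySem.List.pyGetD_natCast] at hc
              simpa using hc
          · rw [if_neg hjm, ih (by omega) (by omega) j hj]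
            by_cases hjm' : j < m
            · rw [if_pos hjm', if_pos (by omega)]
            · rw [if_neg hjm', if_neg (by omega)]
        · rw [if_neg hc, ih (by omega) (by omega) j hj]
          by_cases hjm' : j < m
          · rw [if_pos hjm', if_pos (by omega)]
          · rw [if_neg hjm']
            by_cases hjm : j = m
            · subst hjm
              rw [if_pos (by omega), hniRecm, if_neg ?_]
              rw [PySem.List.pyGetD_natCast, hcast, PySem.List.pyGetD_natCast] at hc
              simpa using hc
            · rw [if_neg (by omega)]

theorem pyRangeNegAppend (a e : Int) (h : e ≤ a) :
    PySem.List.pyRange a (e - 1) (-1) = PySem.List.pyRange a e (-1) ++ [e] := by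
  rw [PySem.List.pyRange_neg_one, PySem.List.pyRange_neg_one,
      show (a - (e - 1)).toNat = (a - e).toNat + 1 from by omega,
      List.range_succ, List.map_append]
  simp only [List.map_cons, List.map_nil]
  congr 2
  omega

theorem ndLoop (nums : List Int) (n : Nat) (hn : n = nums.length) (hn1 : 1 ≤ n) :
    ∀ (m : Nat), m ≤ n - 1 →
    ∀ j < n,
      PySem.List.pyGetD
        ((PySem.List.pyRange ((n : Int) - 2) ((n : Int) - 2 - (m : Int)) (-1)).foldl (fun arr i =>
          if PySem.List.pyGetD nums i 0 ≤ PySem.List.pyGetD nums (i + 1) 0 then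
            PySem.List.pySetD arr i (PySem.List.pyGetD arr (i + 1) 0 + 1)
          else arr) (List.replicate nums.length (1 : Int))) (j : Int) 0
      = if n - 1 - m ≤ j then ndR nums n (n - 1 - j) else 1 := by
  intro m
  induction m with
  | zero =>
      intro _ j hj
      rw [show (n : Int) - 2 - ((0 : Nat) : Int) = (n : Int) - 2 from by omega,
          PySem.List.pyRange_neg_one_eq_nil (by omega)]
      simp only [List.foldl_nil, PySem.List.pyGetD_natCast]
      rw [List.getD_replicate _ (by omega)]
      by_cases h0 : n - 1 - 0 ≤ j
      · rw [if_pos h0, show n - 1 - j = 0 from by omega]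
        simp [ndR]
      · rw [if_neg h0]
  | succ m ih =>
      intro hm j hj
      have he0 : (0 : Int) ≤ (n : Int) - 2 - (m : Int) := by omega
      have hsplit : PySem.List.pyRange ((n : Int) - 2) ((n : Int) - 2 - ((m + 1 : Nat) : Int)) (-1)
          = PySem.List.pyRange ((n : Int) - 2) ((n : Int) - 2 - (m : Int)) (-1)
            ++ [(n : Int) - 2 - (m : Int)] := by
        rw [show (n : Int) - 2 - ((m + 1 : Nat) : Int) = ((n : Int) - 2 - (m : Int)) - 1 from by
              push_cast; ring]
        exact pyRangeNegAppend _ _ (by omega)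
      rw [hsplit, List.foldl_append]
      set L := (PySem.List.pyRange ((n : Int) - 2) ((n : Int) - 2 - (m : Int)) (-1)).foldl (fun arr i =>
          if PySem.List.pyGetD nums i 0 ≤ PySem.List.pyGetD nums (i + 1) 0 then
            PySem.List.pySetD arr i (PySem.List.pyGetD arr (i + 1) 0 + 1)
          else arr) (List.replicate nums.length (1 : Int)) with hL
      have hLlen : L.length = nums.length := by rw [hL, ndLen]; simp
      simp only [List.foldl_cons, List.foldl_nil]
      have hecast : (n : Int) - 2 - (m : Int) = ((n - 2 - m : Nat) : Int) := by omega
      have hecast1 : (n : Int) - 2 - (m : Int) + 1 = ((n - 1 - m : Nat) : Int) := by omega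
      have hgetup : PySem.List.pyGetD L ((n : Int) - 2 - (m : Int) + 1) 0 = ndR nums n m := by
        rw [hecast1, ih (by omega) (n - 1 - m) (by omega), if_pos (le_refl _),
            show n - 1 - (n - 1 - m) = m from by omega]
      have hndRm : ndR nums n (m + 1)
          = if nums.getD (n - 2 - m) 0 ≤ nums.getD (n - 1 - m) 0 then ndR nums n m + 1 else 1 := by
        simp only [ndR]
      by_cases hc : PySem.List.pyGetD nums ((n : Int) - 2 - (m : Int)) 0
          ≤ PySem.List.pyGetD nums ((n : Int) - 2 - (m : Int) + 1) 0
      · rw [if_pos hc, hgetup, hecast,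
            PySem.List.pyGetD_pySetD_natCast L (n - 2 - m) j _ 0 (by omega)]
        rw [hecast1, PySem.List.pyGetD_natCast] at hc
        rw [hecast, PySem.List.pyGetD_natCast] at hc
        by_cases hje : j = n - 2 - m
        · rw [if_pos hje, if_pos (by omega), show n - 1 - j = m + 1 from by omega,
              hndRm, if_pos hc]
        · rw [if_neg hje, ih (by omega) j hj]
          by_cases hj' : n - 1 - m ≤ j
          · rw [if_pos hj', if_pos (by omega)]
          · rw [if_neg hj', if_neg (by omega)]
      · rw [if_neg hc, ih (by omega) j hj]
        rw [hecast1, PySem.List.pyGetD_natCast] at hc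
        rw [hecast, PySem.List.pyGetD_natCast] at hc
        by_cases hj' : n - 1 - m ≤ j
        · rw [if_pos hj', if_pos (by omega)]
        · rw [if_neg hj']
          by_cases hje : j = n - 2 - m
          · rw [if_pos (by omega), hje, show n - 1 - (n - 2 - m) = m + 1 from by omega,
                hndRm, if_neg hc]
          · rw [if_neg (by omega)]

theorem bFold (nums : List Int) (m : Nat) :
    (PySem.List.pyRange 1 (m : Int) 1).foldl (fun (st : List Int × List Int) j =>
      (st.1 ++ [PySem.List.pyGetD st.1 (j - 1) 0 +
          (if PySem.List.pyGetD nums j 0 > PySem.List.pyGetD nums (j - 1) 0 then (1 : Int) else 0)],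
       st.2 ++ [PySem.List.pyGetD st.2 (j - 1) 0 +
          (if PySem.List.pyGetD nums j 0 < PySem.List.pyGetD nums (j - 1) 0 then (1 : Int) else 0)]))
      ([0], [0])
    = ((List.range (max m 1)).map (upRec nums), (List.range (max m 1)).map (downRec nums)) := by
  induction m with
  | zero =>
      rw [PySem.List.pyRange_one_eq_nil (by norm_num)]
      simp [List.range_one, upRec, downRec]
  | succ m ih =>
      by_cases hm0 : m = 0
      · subst hm0
        rw [PySem.List.pyRange_one_eq_nil (by norm_num)]
        simp [List.range_one, upRec, downRec]
      · have hmm : 1 ≤ m := by omega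
        have hsplit : PySem.List.pyRange 1 ((m + 1 : Nat) : Int) 1
            = PySem.List.pyRange 1 (m : Int) 1 ++ [(m : Int)] := by
          push_cast
          exact PySem.List.pyRange_one_succ_right (by exact_mod_cast hmm)
        rw [hsplit, List.foldl_append, ih]
        simp only [List.foldl_cons, List.foldl_nil]
        have hmax : max m 1 = m := by omega
        have hmax1 : max (m + 1) 1 = m + 1 := by omega
        have hcast : (m : Int) - 1 = ((m - 1 : Nat) : Int) := by omega
        rw [hmax, hmax1, hcast]
        simp only [PySem.List.pyGetD_natCast]
        rw [PySem.List.getD_map_range (upRec nums) m (m - 1) 0 (by omega),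
            PySem.List.getD_map_range (downRec nums) m (m - 1) 0 (by omega),
            List.range_succ, List.map_append, List.map_append]
        simp only [List.map_cons, List.map_nil, Prod.mk.injEq]
        have hux : upRec nums (m - 1)
              + (if nums.getD ((m : Nat)) 0 > nums.getD (m - 1) 0 then (1 : Int) else 0)
            = upRec nums m := by
          simp only [gt_iff_lt]
          conv_rhs => rw [show m = (m - 1) + 1 from by omega]
          simp only [upRec]
          rw [show m - 1 + 1 = m from by omega]
        have hdx : downRec nums (m - 1)
              + (if nums.getD ((m : Nat)) 0 < nums.getD (m - 1) 0 then (1 : Int) else 0)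
            = downRec nums m := by
          conv_rhs => rw [show m = (m - 1) + 1 from by omega]
          simp only [downRec]
          rw [show m - 1 + 1 = m from by omega]
        rw [hux, hdx]
        exact ⟨rfl, rfl⟩

theorem mainEq (nums : List Int) (k : Int) (hk : 1 ≤ k) :
    goodIndices nums k = goodIndices_alt nums k := by
  unfold goodIndices goodIndices_alt
  simp only [PySem.List.len_eq]
  simp only [bFold nums nums.length]
  refine Eq.trans ((PySem.List.foldl_append_ite_eq_filter
        (fun i => k ≤ PySem.List.pyGetD ((PySem.List.pyRange 1 ((nums.length : Int)) 1).foldl (fun arr i =>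
            if PySem.List.pyGetD nums i 0 ≤ PySem.List.pyGetD nums (i - 1) 0 then
              PySem.List.pySetD arr i (PySem.List.pyGetD arr (i - 1) 0 + 1)
            else arr) (List.replicate nums.length (1 : Int))) (i - 1) 0
          ∧ k ≤ PySem.List.pyGetD ((PySem.List.pyRange ((nums.length : Int) - 2) (-1) (-1)).foldl (fun arr i =>
            if PySem.List.pyGetD nums i 0 ≤ PySem.List.pyGetD nums (i + 1) 0 then
              PySem.List.pySetD arr i (PySem.List.pyGetD arr (i + 1) 0 + 1)
            else arr) (List.replicate nums.length (1 : Int))) (i + 1) 0)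
        (PySem.List.pyRange k ((nums.length : Int) - k) 1) []).trans (List.nil_append _)) ?_
  apply List.filter_congr
  intro i hi
  rw [PySem.List.mem_pyRange_one] at hi
  set n := nums.length with hn
  have hki : k ≤ i := hi.1
  have hin : i < (n : Int) - k := hi.2
  have hn1 : 1 ≤ n := by omega
  set I := i.toNat with hI
  set K := k.toNat with hK
  have hiI : i = (I : Int) := by omega
  have hkK : k = (K : Int) := by omega
  have hK1 : 1 ≤ K := by omega
  have hKI : K ≤ I := by omega
  have hIK : I + K ≤ n - 1 := by omega
  -- left side of A: non_inc[i-1]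
  have hNI : PySem.List.pyGetD ((PySem.List.pyRange 1 ((n : Int)) 1).foldl (fun arr i =>
        if PySem.List.pyGetD nums i 0 ≤ PySem.List.pyGetD nums (i - 1) 0 then
          PySem.List.pySetD arr i (PySem.List.pyGetD arr (i - 1) 0 + 1)
        else arr) (List.replicate nums.length (1 : Int))) (i - 1) 0 = niRec nums (I - 1) := by
    rw [show i - 1 = ((I - 1 : Nat) : Int) from by omega,
        niLoop nums n hn1 (by omega) (I - 1) (by omega), if_pos (by omega)]
  -- right side of A: non_dec[i+1]
  have hND : PySem.List.pyGetD ((PySem.List.pyRange ((n : Int) - 2) (-1) (-1)).foldl (fun arr i =>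
        if PySem.List.pyGetD nums i 0 ≤ PySem.List.pyGetD nums (i + 1) 0 then
          PySem.List.pySetD arr i (PySem.List.pyGetD arr (i + 1) 0 + 1)
        else arr) (List.replicate nums.length (1 : Int))) (i + 1) 0
      = ndR nums n (n - 2 - I) := by
    have h := ndLoop nums n hn hn1 (n - 1) (le_refl _) (I + 1) (by omega)
    rw [show (n : Int) - 2 - ((n - 1 : Nat) : Int) = -1 from by omega] at h
    rw [show i + 1 = ((I + 1 : Nat) : Int) from by omega, h, if_pos (by omega),
        show n - 1 - (I + 1) = n - 2 - I from by omega]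
  -- B's four prefix-count reads
  have hmax : max n 1 = n := by omega
  have hU1 : PySem.List.pyGetD ((List.range (max n 1)).map (upRec nums)) (i - 1) 0
      = upRec nums (I - 1) := by
    rw [hmax, show i - 1 = ((I - 1 : Nat) : Int) from by omega, PySem.List.pyGetD_natCast,
        PySem.List.getD_map_range _ _ _ _ (by omega)]
  have hU2 : PySem.List.pyGetD ((List.range (max n 1)).map (upRec nums)) (i - k) 0
      = upRec nums (I - K) := by
    rw [hmax, show i - k = ((I - K : Nat) : Int) from by omega, PySem.List.pyGetD_natCast,
        PySem.List.getD_map_range _ _ _ _ (by omega)]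
  have hD1 : PySem.List.pyGetD ((List.range (max n 1)).map (downRec nums)) (i + k) 0
      = downRec nums (I + K) := by
    rw [hmax, show i + k = ((I + K : Nat) : Int) from by omega, PySem.List.pyGetD_natCast,
        PySem.List.getD_map_range _ _ _ _ (by omega)]
  have hD2 : PySem.List.pyGetD ((List.range (max n 1)).map (downRec nums)) (i + 1) 0
      = downRec nums (I + 1) := by
    rw [hmax, show i + 1 = ((I + 1 : Nat) : Int) from by omega, PySem.List.pyGetD_natCast,
        PySem.List.getD_map_range _ _ _ _ (by omega)]
  rw [hNI, hND, hU1, hU2, hD1, hD2]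
  rw [decide_eq_decide]
  apply and_congr
  · have h := niUp nums (I - 1) K hK1 (by omega)
    rw [show I - 1 + 1 - K = I - K from by omega] at h
    rw [hkK]; exact h
  · have h := ndDown nums n (n - 2 - I) K hK1 (by omega) (by omega)
    rw [show n - 1 - (n - 2 - I) = I + 1 from by omega,
        show I + 1 + (K - 1) = I + K from by omega] at h
    rw [hkK]; exact h

-- ===== VERDICT (by name: the statement is the Claim_ definition above) =====
theorem goodIndices_spec : Claim_equal_goodIndices := by
  intro nums k _ hk
  exact mainEq nums k hk
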